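-- pv_equiv track=rewrite | github.com/jeffcaldwellca/cups-dashboard | dashboard.py | parse_explicit_impressions
-- ===== SOURCE A (Python) =====
-- from typing import Iterable, Optional
--
-- def clean_token(value: str) -> str:
--     cleaned = value.strip()
--     # Handle common malformed leading/trailing escapes and quotes from page_log tokens.
--     while True:
--         before = cleaned
--         if cleaned.startswith('\\"'):
--             cleaned = cleaned[2:]
--         if cleaned.endswith('\\"'):
--             cleaned = cleaned[:-2]
--         cleaned = cleaned.strip('"').strip("'").strip()
--         if cleaned == before:
--             break
--     return cleaned
--
-- def parse_int_token(value: str) -> int: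
--     cleaned = clean_token(value)
--     try:
--         return int(cleaned)
--     except ValueError:
--         return 0
--
-- def parse_explicit_impressions(tokens: list[str]) -> Optional[int]:
--     for token in tokens:
--         lower = token.lower()
--         for prefix in ("impressions=", "impression=", "impressions:", "impression:"):
--             if lower.startswith(prefix):
--                 value = token[len(prefix):]
--                 parsed = parse_int_token(value)
--                 return parsed if parsed >= 0 else 0
--     return None
-- ===== SOURCE B (Python) =====
-- from typing import Optional
--
-- def clean_token(value: str) -> str:
--     cleaned = value.strip()
--     # Handle common malformed leading/trailing escapes and quotes from page_log tokens.
--     while True: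
--         before = cleaned
--         if cleaned.startswith('\\"'):
--             cleaned = cleaned[2:]
--         if cleaned.endswith('\\"'):
--             cleaned = cleaned[:-2]
--         cleaned = cleaned.strip('"').strip("'").strip()
--         if cleaned == before:
--             break
--     return cleaned
--
-- def parse_int_token(value: str) -> int:
--     cleaned = clean_token(value)
--     try:
--         return int(cleaned)
--     except ValueError:
--         return 0
--
-- def _match_token(token: str) -> Optional[int]:
--     # split once at the first '=' or ':' and test the key against the two spellings
--     for i, ch in enumerate(token):
--         if ch in '=:':
--             if token[:i].lower() in ('impression', 'impressions'):
--                 return max(parse_int_token(token[i + 1:]), 0)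
--             return None
--     return None
--
-- def parse_explicit_impressions(tokens: list[str]) -> Optional[int]:
--     for token in tokens:
--         res = _match_token(token)
--         if res is not None:
--             return res
--     return None
-- ===== Notes on version B (the rewrite author's own statement) =====
-- stated objective: simpler
-- what changed: B replaces A's per-token scan over four hard-coded 'impression(s)=/:'-prefix tests by a single split of each token at its first '='/':' separator followed by a lookup of the lower-cased key in {'impression','impressions'} (one scan to the separator instead of four prefix comparisons per token), clamping with max(.,0) instead of a conditional.
import Mathlib
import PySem

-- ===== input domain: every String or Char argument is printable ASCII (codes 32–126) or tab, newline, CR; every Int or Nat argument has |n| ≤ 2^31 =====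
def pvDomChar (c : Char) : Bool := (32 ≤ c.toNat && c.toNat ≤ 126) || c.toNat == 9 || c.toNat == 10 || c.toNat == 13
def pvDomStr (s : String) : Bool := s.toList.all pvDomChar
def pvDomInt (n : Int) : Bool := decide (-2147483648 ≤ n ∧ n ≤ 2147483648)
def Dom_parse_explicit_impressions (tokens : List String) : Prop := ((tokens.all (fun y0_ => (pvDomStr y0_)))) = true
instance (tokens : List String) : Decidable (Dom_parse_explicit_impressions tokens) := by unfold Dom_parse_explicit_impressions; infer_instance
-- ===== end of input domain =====

set_option maxRecDepth 4000


-- B replaces A's four hard-coded "impression(s)=/:" prefix tests per token by one split at the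
-- first '='/':' separator followed by a key lookup (objective: simpler decomposition).

-- ===== PORT A =====
-- shared helpers (clean_token / parse_int_token are identical in Source A and Source B)
-- one pass of the body of clean_token's while-loop
def pvCleanStep (cs : List Char) : List Char :=
  let a := if PySem.Chars.startswith cs ['\\', '"'] then PySem.Chars.slice cs (some 2) none else cs
  let b := if PySem.Chars.endswith a ['\\', '"'] then PySem.Chars.slice a none (some (-2)) else a
  PySem.Chars.strip (PySem.Chars.stripChars (PySem.Chars.stripChars b ['"']) ['\''])

-- the while-True loop; fuel (length + 1) only makes it total: a changed iteration only removes
-- characters, so it strictly shortens and the fixed point is reached within the fuel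
def pvCleanLoop : Nat → List Char → List Char
  | 0, cs => cs
  | f + 1, cs =>
    let n := pvCleanStep cs
    if n = cs then cs else pvCleanLoop f n

def pvCleanToken (value : List Char) : List Char :=
  let cs := PySem.Chars.strip value
  pvCleanLoop (cs.length + 1) cs

def pvParseIntToken (value : List Char) : Int :=
  match PySem.Int.ofChars? (pvCleanToken value) with
  | some n => n
  | none => 0

-- the word "impression" as a character list (string literals kept as explicit char lists)
def pvI : List Char := ['i', 'm', 'p', 'r', 'e', 's', 's', 'i', 'o', 'n']

def pvPrefixes : List (List Char) :=
  [pvI ++ ['s', '='], pvI ++ ['='], pvI ++ ['s', ':'], pvI ++ [':']]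

-- the inner 'for prefix in (...)' loop of A
def pvTryPrefixes (cs lower : List Char) : List (List Char) → Option Int
  | [] => none
  | p :: ps =>
    if PySem.Chars.startswith lower p then
      let value := PySem.Chars.slice cs (some (p.length : Int)) none
      let parsed := pvParseIntToken value
      some (if parsed ≥ 0 then parsed else 0)
    else pvTryPrefixes cs lower ps

def parse_explicit_impressions : List String → Option Int
  | [] => none
  | t :: rest =>
    match pvTryPrefixes t.toList (PySem.Chars.lower t.toList) pvPrefixes with
    | some v => some v
    | none => parse_explicit_impressions rest

-- ===== PORT B =====
def pvSep (c : Char) : Bool := c == '=' || c == ':'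

def pvKeys : List (List Char) := [pvI, pvI ++ ['s']]

-- _match_token: split once at the first separator, test the lower-cased key
def pvMatchToken (cs : List Char) : Option Int :=
  match cs.findIdx? pvSep with
  | some i =>
    if PySem.Chars.lower (PySem.Chars.slice cs none (some (i : Int))) ∈ pvKeys then
      some (max (pvParseIntToken (PySem.Chars.slice cs (some ((i : Int) + 1)) none)) 0)
    else none
  | none => none

def parse_explicit_impressions_alt : List String → Option Int
  | [] => none
  | t :: rest =>
    match pvMatchToken t.toList with
    | some v => some v
    | none => parse_explicit_impressions_alt rest

-- ===== PRECONDITION & SPEC =====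
def Spec_parse_explicit_impressions (tokens : List String) (out : Option Int) : Prop := out = parse_explicit_impressions_alt tokens
instance (tokens : List String) (out : Option Int) : Decidable (Spec_parse_explicit_impressions tokens out) := by unfold Spec_parse_explicit_impressions; infer_instance

-- ===== CLAIM (what is proved, stated in full; the proofs are below) =====
def Claim_equal_parse_explicit_impressions : Prop := ∀ (tokens : List String), Dom_parse_explicit_impressions tokens → Spec_parse_explicit_impressions tokens (parse_explicit_impressions tokens)

-- ===== LEMMAS AND PROOFS =====

-- lowerChar fixes separators and maps nothing else onto one
lemma pvLowerChar_of_sep (c : Char) (h : pvSep c = true) : PySem.Chars.lowerChar c = c := by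
  simp only [pvSep, Bool.or_eq_true, beq_iff_eq] at h
  rcases h with h | h <;> subst h <;> decide

lemma pvSep_lowerChar (c : Char) : pvSep (PySem.Chars.lowerChar c) = pvSep c := by
  unfold PySem.Chars.lowerChar
  split
  · next hup =>
    simp only [PySem.Chars.isupper, Bool.and_eq_true, decide_eq_true_eq, Char.le_def,
      UInt32.le_iff_toNat_le] at hup
    have hup : 65 ≤ c.toNat ∧ c.toNat ≤ 90 := hup
    have hv : (c.toNat + 32) < 0xD800 := by omega
    have ht : (Char.ofNat (c.toNat + 32)).toNat = c.toNat + 32 := by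
      rw [Char.ofNat, dif_pos]
      · rfl
      · exact Or.inl hv
    have h1 : pvSep (Char.ofNat (c.toNat + 32)) = false := by
      simp only [pvSep, Bool.or_eq_false_iff, beq_eq_false_iff_ne]
      refine ⟨fun h => ?_, fun h => ?_⟩
      · have := congrArg Char.toNat h; rw [ht, show ('=' : Char).toNat = 61 from by decide] at this; omega
      · have := congrArg Char.toNat h; rw [ht, show (':' : Char).toNat = 58 from by decide] at this; omega
    have h2 : pvSep c = false := by
      simp only [pvSep, Bool.or_eq_false_iff, beq_eq_false_iff_ne]
      refine ⟨fun h => ?_, fun h => ?_⟩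
      · have := congrArg Char.toNat h; rw [show ('=' : Char).toNat = 61 from by decide] at this; omega
      · have := congrArg Char.toNat h; rw [show (':' : Char).toNat = 58 from by decide] at this; omega
    rw [h1, h2]
  · rfl

lemma pvPrefix_findIdx (cs w : List Char) (sep : Char)
    (hw : ∀ c ∈ w, pvSep c = false) (hs : pvSep sep = true)
    (h : (w ++ [sep]) <+: cs.map PySem.Chars.lowerChar) :
    cs.findIdx? pvSep = some w.length ∧
    PySem.Chars.lower (cs.take w.length) = w ∧
    ∃ hlt : w.length < cs.length, cs[w.length] = sep := by
  have hlen : w.length + 1 ≤ cs.length := by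
    have := h.length_le
    simpa using this
  have htake := List.prefix_iff_eq_take.mp h
  have hget : ∀ j (hj : j < w.length + 1),
      PySem.Chars.lowerChar cs[j] = (w ++ [sep])[j]'(by simpa using hj) := by
    intro j hj
    have : (w ++ [sep])[j]'(by simpa using hj)
        = (List.take (w.length + 1) (cs.map PySem.Chars.lowerChar))[j]'(by
            simp [List.length_take]; omega) := by
      congr 1
      simpa using htake
    rw [this]
    simp [List.getElem_take, List.getElem_map]
  have hsepAt : PySem.Chars.lowerChar cs[w.length] = sep := by
    have := hget w.length (by omega)
    simpa using this
  have hcssep : pvSep cs[w.length] = true := by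
    rw [← pvSep_lowerChar, hsepAt]; exact hs
  have hbefore : ∀ j (hj : j < w.length) (hj2 : j < cs.length), pvSep cs[j] = false := by
    intro j hj hj2
    have h1 := hget j (by omega)
    have h2 : (w ++ [sep])[j]'(by simp; omega) = w[j] := by
      simp [List.getElem_append_left, hj]
    rw [h2] at h1
    rw [← pvSep_lowerChar, h1]
    exact hw _ (List.getElem_mem hj)
  refine ⟨?_, ?_, ⟨by omega, ?_⟩⟩
  · rw [List.findIdx?_eq_some_iff_getElem]
    exact ⟨by omega, hcssep, fun j hj => by rw [hbefore j hj (by omega)]; decide⟩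
  · apply List.ext_getElem
    · simp [PySem.Chars.lower]; omega
    · intro j hj1 hj2
      have h1 := hget j (by simp [PySem.Chars.lower, List.length_take] at hj1; omega)
      have hjw : j < w.length := hj2
      have h2 : (w ++ [sep])[j]'(by simp; omega) = w[j] := by
        simp [List.getElem_append_left, hjw]
      simp only [PySem.Chars.lower, List.getElem_map, List.getElem_take]
      rw [h1, h2]
  · exact (pvLowerChar_of_sep _ hcssep).symm.trans hsepAt

lemma pvKey_prefix (cs : List Char) (i : Nat) (hlt : i < cs.length)
    (hi : cs.findIdx? pvSep = some i) :
    (PySem.Chars.lower (cs.take i) ++ [cs[i]]) <+: cs.map PySem.Chars.lowerChar := by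
  obtain ⟨_, hsep, _⟩ := List.findIdx?_eq_some_iff_getElem.mp hi
  have hfix : PySem.Chars.lowerChar cs[i] = cs[i] := pvLowerChar_of_sep _ hsep
  have : PySem.Chars.lower (cs.take i) ++ [cs[i]] = (cs.map PySem.Chars.lowerChar).take (i + 1) := by
    rw [List.take_add_one]
    simp [PySem.Chars.lower, List.map_take, hlt, hfix]
  rw [this]
  exact List.take_prefix _ _


-- the if-clamp of A equals the max-clamp of B
lemma pvClamp (n : Int) : (if n ≥ 0 then n else 0) = max n 0 := by
  split_ifs <;> omega

-- per-token agreement of the two scans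
lemma pvToken_eq (cs : List Char) :
    pvTryPrefixes cs (PySem.Chars.lower cs) pvPrefixes = pvMatchToken cs := by
  rcases h : cs.findIdx? pvSep with _ | i
  · -- no separator: no prefix can match either
    have hno : ∀ (w : List Char) (sep : Char), (∀ c ∈ w, pvSep c = false) → pvSep sep = true →
        PySem.Chars.startswith (PySem.Chars.lower cs) (w ++ [sep]) = false := by
      intro w sep hw hs
      rw [Bool.eq_false_iff]
      intro hT
      have h1 := (pvPrefix_findIdx cs w sep hw hs ((PySem.Chars.startswith_iff _ _).mp hT)).1
      rw [h] at h1
      cases h1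
    have s1 := hno (pvI ++ ['s']) '=' (by simp [pvI, pvSep]) rfl
    have s2 := hno pvI '=' (by simp [pvI, pvSep]) rfl
    have s3 := hno (pvI ++ ['s']) ':' (by simp [pvI, pvSep]) rfl
    have s4 := hno pvI ':' (by simp [pvI, pvSep]) rfl
    rw [show ((pvI ++ ['s']) ++ ['=']) = pvI ++ ['s', '='] from by simp] at s1
    rw [show ((pvI ++ ['s']) ++ [':']) = pvI ++ ['s', ':'] from by simp] at s3
    simp only [pvTryPrefixes, pvPrefixes, pvMatchToken, h, s1, s2, s3, s4,
      Bool.false_eq_true, if_false]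
  · obtain ⟨hlt, hsepi, hmin⟩ := List.findIdx?_eq_some_iff_getElem.mp h
    have hpos : PySem.Chars.startswith (PySem.Chars.lower cs)
        (PySem.Chars.lower (cs.take i) ++ [cs[i]]) = true :=
      (PySem.Chars.startswith_iff _ _).mpr (pvKey_prefix cs i hlt h)
    have hchar : ∀ (w : List Char) (sep : Char), (∀ c ∈ w, pvSep c = false) → pvSep sep = true →
        PySem.Chars.startswith (PySem.Chars.lower cs) (w ++ [sep]) = true →
        i = w.length ∧ PySem.Chars.lower (cs.take i) = w ∧ cs[i] = sep := by
      intro w sep hw hs hT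
      obtain ⟨h1, h2, hlt2, h3⟩ := pvPrefix_findIdx cs w sep hw hs
        ((PySem.Chars.startswith_iff _ _).mp hT)
      rw [h] at h1
      have hiw : i = w.length := by simpa using h1
      subst hiw
      exact ⟨rfl, h2, h3⟩
    have hcsep : cs[i] = '=' ∨ cs[i] = ':' := by
      simpa [pvSep] using hsepi
    have hslk : PySem.Chars.slice cs none (some (i : Int)) = cs.take i := by
      simp [PySem.List.slice_to_natCast]
    by_cases hk : PySem.Chars.lower (cs.take i) = pvI ∨
        PySem.Chars.lower (cs.take i) = pvI ++ ['s']
    · have hmem : PySem.Chars.lower (PySem.Chars.slice cs none (some (i : Int))) ∈ pvKeys := by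
        rw [hslk]; simpa [pvKeys] using hk
      rcases hk with hk | hk
      · -- key "impression", i = 10
        have hi10 : i = 10 := by
          have := congrArg List.length hk
          simp only [PySem.Chars.lower, List.length_map, List.length_take,
            show pvI.length = 10 from rfl] at this
          omega
        have hb1 : PySem.Chars.startswith (PySem.Chars.lower cs) (pvI ++ ['s', '=']) = false := by
          rw [Bool.eq_false_iff]; intro hT
          have := (hchar (pvI ++ ['s']) '=' (by simp [pvI, pvSep]) rfl
            (by rw [show ((pvI ++ ['s']) ++ ['=']) = pvI ++ ['s', '='] from by simp]; exact hT)).1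
          simp [show (pvI ++ ['s']).length = 11 from rfl] at this; omega
        have hb3 : PySem.Chars.startswith (PySem.Chars.lower cs) (pvI ++ ['s', ':']) = false := by
          rw [Bool.eq_false_iff]; intro hT
          have := (hchar (pvI ++ ['s']) ':' (by simp [pvI, pvSep]) rfl
            (by rw [show ((pvI ++ ['s']) ++ [':']) = pvI ++ ['s', ':'] from by simp]; exact hT)).1
          simp [show (pvI ++ ['s']).length = 11 from rfl] at this; omega
        rcases hcsep with hc | hc
        · -- separator '=': branch "impression=" fires
          have hb2 : PySem.Chars.startswith (PySem.Chars.lower cs) (pvI ++ ['=']) = true := by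
            rw [← hk, ← hc]; exact hpos
          subst hi10
          simp only [pvTryPrefixes, pvPrefixes, pvMatchToken, h, hb1, hb2,
            Bool.false_eq_true, if_false, if_true]
          rw [if_pos hmem, pvClamp,
            show ((pvI ++ ['=']).length : Int) = ((10 : Nat) : Int) + 1 from by decide]
        · -- separator ':': branch "impression:" fires
          have hb2 : PySem.Chars.startswith (PySem.Chars.lower cs) (pvI ++ ['=']) = false := by
            rw [Bool.eq_false_iff]; intro hT
            have := (hchar pvI '=' (by simp [pvI, pvSep]) rfl hT).2.2
            rw [hc] at this; cases this
          have hb4 : PySem.Chars.startswith (PySem.Chars.lower cs) (pvI ++ [':']) = true := by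
            rw [← hk, ← hc]; exact hpos
          subst hi10
          simp only [pvTryPrefixes, pvPrefixes, pvMatchToken, h, hb1, hb2, hb3, hb4,
            Bool.false_eq_true, if_false, if_true]
          rw [if_pos hmem, pvClamp,
            show ((pvI ++ [':']).length : Int) = ((10 : Nat) : Int) + 1 from by decide]
      · -- key "impressions", i = 11
        have hi11 : i = 11 := by
          have := congrArg List.length hk
          simp only [PySem.Chars.lower, List.length_map, List.length_take,
            show (pvI ++ ['s']).length = 11 from rfl] at this
          omega
        rcases hcsep with hc | hc
        · have hb1 : PySem.Chars.startswith (PySem.Chars.lower cs) (pvI ++ ['s', '=']) = true := by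
            rw [show pvI ++ ['s', '='] = (pvI ++ ['s']) ++ ['='] from by simp, ← hk, ← hc]
            exact hpos
          subst hi11
          simp only [pvTryPrefixes, pvPrefixes, pvMatchToken, h, hb1, if_true]
          rw [if_pos hmem, pvClamp,
            show ((pvI ++ ['s', '=']).length : Int) = ((11 : Nat) : Int) + 1 from by decide]
        · have hb1 : PySem.Chars.startswith (PySem.Chars.lower cs) (pvI ++ ['s', '=']) = false := by
            rw [Bool.eq_false_iff]; intro hT
            have := (hchar (pvI ++ ['s']) '=' (by simp [pvI, pvSep]) rfl
              (by rw [show ((pvI ++ ['s']) ++ ['=']) = pvI ++ ['s', '='] from by simp]; exact hT)).2.2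
            rw [hc] at this; cases this
          have hb2 : PySem.Chars.startswith (PySem.Chars.lower cs) (pvI ++ ['=']) = false := by
            rw [Bool.eq_false_iff]; intro hT
            have := (hchar pvI '=' (by simp [pvI, pvSep]) rfl hT).1
            simp [show pvI.length = 10 from rfl] at this; omega
          have hb3 : PySem.Chars.startswith (PySem.Chars.lower cs) (pvI ++ ['s', ':']) = true := by
            rw [show pvI ++ ['s', ':'] = (pvI ++ ['s']) ++ [':'] from by simp, ← hk, ← hc]
            exact hpos
          subst hi11
          simp only [pvTryPrefixes, pvPrefixes, pvMatchToken, h, hb1, hb2, hb3,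
            Bool.false_eq_true, if_false, if_true]
          rw [if_pos hmem, pvClamp,
            show ((pvI ++ ['s', ':']).length : Int) = ((11 : Nat) : Int) + 1 from by decide]
    · -- separator found but the key is not impression/impressions: neither side matches
      push Not at hk
      have hno : ∀ (w : List Char) (sep : Char), (∀ c ∈ w, pvSep c = false) → pvSep sep = true →
          (PySem.Chars.lower (cs.take i) ≠ w) →
          PySem.Chars.startswith (PySem.Chars.lower cs) (w ++ [sep]) = false := by
        intro w sep hw hs hne
        rw [Bool.eq_false_iff]; intro hT
        exact hne (hchar w sep hw hs hT).2.1
      have s1 := hno (pvI ++ ['s']) '=' (by simp [pvI, pvSep]) rfl hk.2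
      have s2 := hno pvI '=' (by simp [pvI, pvSep]) rfl hk.1
      have s3 := hno (pvI ++ ['s']) ':' (by simp [pvI, pvSep]) rfl hk.2
      have s4 := hno pvI ':' (by simp [pvI, pvSep]) rfl hk.1
      rw [show ((pvI ++ ['s']) ++ ['=']) = pvI ++ ['s', '='] from by simp] at s1
      rw [show ((pvI ++ ['s']) ++ [':']) = pvI ++ ['s', ':'] from by simp] at s3
      have hmem : PySem.Chars.lower (PySem.Chars.slice cs none (some (i : Int))) ∉ pvKeys := by
        rw [hslk]; simp [pvKeys, hk.1, hk.2]
      simp only [pvTryPrefixes, pvPrefixes, pvMatchToken, h, s1, s2, s3, s4,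
        Bool.false_eq_true, if_false]
      rw [if_neg hmem]

lemma pvMain (tokens : List String) :
    parse_explicit_impressions tokens = parse_explicit_impressions_alt tokens := by
  induction tokens with
  | nil => rfl
  | cons t rest ih =>
    simp only [parse_explicit_impressions, parse_explicit_impressions_alt, pvToken_eq, ih]

-- ===== VERDICT (by name: the statement is the Claim_ definition above) =====
theorem parse_explicit_impressions_spec : Claim_equal_parse_explicit_impressions := by
  intro tokens _
  exact pvMain tokens
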